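-- pv_equiv track=rewrite | github.com/ponchowannie/n-queen | n_queen.py | attacking
-- ===== SOURCE A (Python) =====
-- def attacking(x1, y1, x2, y2):
--     if y1 == y2:
--         return 1
--
--     d1, d2 = x1, y1
--     while (d1 < 7) and (d2 < 7):
--         d1 += 1
--         d2 += 1
--         if (d1==x2) and (d2==y2):
--             return 1
--
--     d1, d2 = x1, y1
--     while (d1 < 7) and (d2 > 0):
--         d1 += 1
--         d2 -= 1
--         if (d1==x2) and (d2==y2):
--             return 1
--     return 0
-- ===== SOURCE B (Python) =====
-- def attacking(x1, y1, x2, y2):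
--     # Closed-form O(1) test replacing A's diagonal-walking loops.
--     if y1 == y2:
--         return 1
--     if x1 < x2 <= 7 and y2 <= 7 and x2 - x1 == y2 - y1:
--         return 1
--     if x1 < x2 <= 7 and y2 >= 0 and x2 - x1 == y1 - y2:
--         return 1
--     return 0
-- ===== Notes on version B (the rewrite author's own statement) =====
-- stated objective: simpler
-- what changed: Replaced the two diagonal-walking while loops with a closed-form O(1) arithmetic test (difference of coordinates plus the board bound 7 that the loops enforce).
import Mathlib
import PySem

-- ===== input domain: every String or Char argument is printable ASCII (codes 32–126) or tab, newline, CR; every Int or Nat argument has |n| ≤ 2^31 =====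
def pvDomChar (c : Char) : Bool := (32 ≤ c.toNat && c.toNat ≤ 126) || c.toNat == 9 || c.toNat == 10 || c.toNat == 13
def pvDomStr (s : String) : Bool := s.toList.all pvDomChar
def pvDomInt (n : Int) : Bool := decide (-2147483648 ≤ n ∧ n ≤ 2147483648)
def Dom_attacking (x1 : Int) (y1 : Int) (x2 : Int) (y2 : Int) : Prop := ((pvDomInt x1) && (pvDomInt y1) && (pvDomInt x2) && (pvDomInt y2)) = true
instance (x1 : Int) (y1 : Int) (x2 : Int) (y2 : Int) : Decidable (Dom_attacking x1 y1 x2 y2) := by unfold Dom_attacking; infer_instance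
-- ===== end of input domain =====

-- B replaces A's two diagonal-walking while loops with a closed-form arithmetic test (simpler).


-- ===== PORT A =====
-- first while loop: walk the down-right diagonal
def attackLoop1 (x2 y2 d1 d2 : Int) : Bool :=
  if d1 < 7 ∧ d2 < 7 then
    if d1 + 1 = x2 ∧ d2 + 1 = y2 then true
    else attackLoop1 x2 y2 (d1 + 1) (d2 + 1)
  else false
termination_by (7 - d1).toNat
decreasing_by omega

-- second while loop: walk the up-right diagonal
def attackLoop2 (x2 y2 d1 d2 : Int) : Bool :=
  if d1 < 7 ∧ d2 > 0 then
    if d1 + 1 = x2 ∧ d2 - 1 = y2 then true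
    else attackLoop2 x2 y2 (d1 + 1) (d2 - 1)
  else false
termination_by (7 - d1).toNat
decreasing_by omega

def attacking (x1 : Int) (y1 : Int) (x2 : Int) (y2 : Int) : Int :=
  if y1 = y2 then 1
  else if attackLoop1 x2 y2 x1 y1 then 1
  else if attackLoop2 x2 y2 x1 y1 then 1
  else 0

-- ===== PORT B =====
def attacking_alt (x1 : Int) (y1 : Int) (x2 : Int) (y2 : Int) : Int :=
  if y1 = y2 then 1
  else if x1 < x2 ∧ x2 ≤ 7 ∧ y2 ≤ 7 ∧ x2 - x1 = y2 - y1 then 1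
  else if x1 < x2 ∧ x2 ≤ 7 ∧ 0 ≤ y2 ∧ x2 - x1 = y1 - y2 then 1
  else 0

-- ===== PRECONDITION & SPEC =====
def Spec_attacking (x1 : Int) (y1 : Int) (x2 : Int) (y2 : Int) (out : Int) : Prop := out = attacking_alt x1 y1 x2 y2
instance (x1 : Int) (y1 : Int) (x2 : Int) (y2 : Int) (out : Int) : Decidable (Spec_attacking x1 y1 x2 y2 out) := by unfold Spec_attacking; infer_instance

-- ===== CLAIM (what is proved, stated in full; the proofs are below) =====
def Claim_equal_attacking : Prop := ∀ (x1 : Int) (y1 : Int) (x2 : Int) (y2 : Int), Dom_attacking x1 y1 x2 y2 → Spec_attacking x1 y1 x2 y2 (attacking x1 y1 x2 y2)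

-- ===== LEMMAS AND PROOFS =====
theorem attackLoop1_iff (x2 y2 d1 d2 : Int) :
    attackLoop1 x2 y2 d1 d2 = true ↔ (d1 < x2 ∧ x2 ≤ 7 ∧ y2 ≤ 7 ∧ x2 - d1 = y2 - d2) := by
  fun_induction attackLoop1 x2 y2 d1 d2 with
  | case1 d1 d2 h hm => simp; omega
  | case2 d1 d2 h hm ih => rw [ih]; omega
  | case3 d1 d2 h => simp; omega

theorem attackLoop2_iff (x2 y2 d1 d2 : Int) :
    attackLoop2 x2 y2 d1 d2 = true ↔ (d1 < x2 ∧ x2 ≤ 7 ∧ 0 ≤ y2 ∧ x2 - d1 = d2 - y2) := by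
  fun_induction attackLoop2 x2 y2 d1 d2 with
  | case1 d1 d2 h hm => simp; omega
  | case2 d1 d2 h hm ih => rw [ih]; omega
  | case3 d1 d2 h => simp; omega

-- ===== VERDICT (by name: the statement is the Claim_ definition above) =====
theorem attacking_spec : Claim_equal_attacking := by
  intro x1 y1 x2 y2 _
  unfold Spec_attacking attacking attacking_alt
  by_cases hy : y1 = y2
  · simp [hy]
  · rw [if_neg hy, if_neg hy]
    by_cases h1 : attackLoop1 x2 y2 x1 y1 = true
    · rw [if_pos h1, if_pos ((attackLoop1_iff x2 y2 x1 y1).mp h1 |>.imp_right (by omega))]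
    · rw [if_neg h1]
      have h1' := (attackLoop1_iff x2 y2 x1 y1).not.mp h1
      rw [if_neg (by omega : ¬ (x1 < x2 ∧ x2 ≤ 7 ∧ y2 ≤ 7 ∧ x2 - x1 = y2 - y1))]
      by_cases h2 : attackLoop2 x2 y2 x1 y1 = true
      · rw [if_pos h2, if_pos ((attackLoop2_iff x2 y2 x1 y1).mp h2 |>.imp_right (by omega))]
      · have h2' := (attackLoop2_iff x2 y2 x1 y1).not.mp h2
        rw [if_neg h2, if_neg (by omega : ¬ (x1 < x2 ∧ x2 ≤ 7 ∧ 0 ≤ y2 ∧ x2 - x1 = y1 - y2))]
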